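-- pv_equiv track=rewrite | github.com/AtharvaK-cyber/policy-analyzer | main.py | is_negated
-- ===== SOURCE A (Python) =====
-- def is_negated(text, keyword):
--
--     words = text.split()
--
--     for i, word in enumerate(words):
--
--         if keyword in word:
--
--             window = words[max(0, i-4):i+1]
--
--             negation_words = ["no", "not", "never", "without"]
--
--             if any(n in window for n in negation_words):
--                 return True
--
--     return False
--
--     return False
-- ===== SOURCE B (Python) =====
-- def is_negated(text, keyword):
--     # One pass: remember the index of the most recent negation word seen so far.
--     last_neg = -5  # sentinel: always below i - 4 for i >= 0
--     for i, word in enumerate(text.split()):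
--         if word in ("no", "not", "never", "without"):
--             last_neg = i
--         if keyword in word and last_neg >= i - 4:
--             return True
--     return False
-- ===== Notes on version B (the rewrite author's own statement) =====
-- stated objective: simpler
-- what changed: Replaces the per-keyword-hit backward window slice and rescan with a single pass that maintains the index of the most recent negation word and compares it to i-4.
import Mathlib
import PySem

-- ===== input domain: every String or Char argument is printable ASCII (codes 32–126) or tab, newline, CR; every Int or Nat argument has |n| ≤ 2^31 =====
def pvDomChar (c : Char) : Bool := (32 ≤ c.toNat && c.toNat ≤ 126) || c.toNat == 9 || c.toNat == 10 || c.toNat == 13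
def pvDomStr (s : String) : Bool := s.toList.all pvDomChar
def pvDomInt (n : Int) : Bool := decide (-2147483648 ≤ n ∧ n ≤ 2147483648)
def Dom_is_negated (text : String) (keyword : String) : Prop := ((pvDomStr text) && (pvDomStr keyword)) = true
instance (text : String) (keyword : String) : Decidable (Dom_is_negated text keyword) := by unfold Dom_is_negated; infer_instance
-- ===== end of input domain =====

-- B maintains the most-recent-negation index in one pass instead of A's backward window slice + rescan per keyword hit; return values agree everywhere (simpler, same behaviour).

-- ===== PORT A =====
-- negation_words = ["no", "not", "never", "without"]
def negationWords : List String := ["no", "not", "never", "without"]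

-- the 'for i, word in enumerate(words)' loop; 'words' is the full split list for the window slice
def loopA (keyword : String) (words : List String) : List (Int × String) → Bool
  | [] => false
  | (i, word) :: rest =>
    if PySem.Str.isIn keyword word then
      let window := PySem.List.slice words (some (max 0 (i - 4))) (some (i + 1))
      if negationWords.any (fun n => window.contains n) then true
      else loopA keyword words rest
    else loopA keyword words rest

def is_negated (text : String) (keyword : String) : Bool :=
  let words := PySem.Str.split₀ text
  loopA keyword words (PySem.List.enumerate words)

-- ===== PORT B =====
-- B's single pass: last_neg carries the index of the most recent negation word
def loopB (keyword : String) : List String → Int → Int → Bool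
  | [], _, _ => false
  | word :: rest, i, lastNeg =>
    let lastNeg := if word == "no" || word == "not" || word == "never" || word == "without" then i else lastNeg
    if PySem.Str.isIn keyword word && decide (i - 4 ≤ lastNeg) then true
    else loopB keyword rest (i + 1) lastNeg

def is_negated_alt (text : String) (keyword : String) : Bool :=
  loopB keyword (PySem.Str.split₀ text) 0 (-5)

-- ===== PRECONDITION & SPEC =====
def Spec_is_negated (text : String) (keyword : String) (out : Bool) : Prop := out = is_negated_alt text keyword
instance (text : String) (keyword : String) (out : Bool) : Decidable (Spec_is_negated text keyword out) := by unfold Spec_is_negated; infer_instance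

-- ===== CLAIM (what is proved, stated in full; the proofs are below) =====
def Claim_equal_is_negated : Prop := ∀ (text : String) (keyword : String), Dom_is_negated text keyword → Spec_is_negated text keyword (is_negated text keyword)

-- ===== LEMMAS AND PROOFS =====

-- common characterisation: a keyword-bearing word at k with a negation word at j ∈ [k-4, k]
def NegSpec (keyword : String) (words : List String) : Prop :=
  ∃ k, ∃ (hk : k < words.length), PySem.Str.isIn keyword words[k] = true ∧
    ∃ j, j ≤ k ∧ ∃ (hj : j < words.length), words[j] ∈ negationWords ∧ (k : Int) - 4 ≤ (j : Int)

theorem mem_drop_take {α : Type} (l : List α) (a b : Nat) (x : α) :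
    x ∈ (l.drop a).take b ↔ ∃ j, ∃ (hj : j < l.length), a ≤ j ∧ j < a + b ∧ l[j] = x := by
  rw [List.mem_iff_getElem]
  constructor
  · rintro ⟨m, hm, hget⟩
    have hm' := hm
    rw [List.length_take, List.length_drop] at hm'
    refine ⟨a + m, by omega, by omega, by omega, ?_⟩
    rw [List.getElem_take, List.getElem_drop] at hget
    exact hget
  · rintro ⟨j, hj, haj, hjb, rfl⟩
    refine ⟨j - a, ?_, ?_⟩
    · rw [List.length_take, List.length_drop]; omega
    · rw [List.getElem_take, List.getElem_drop]
      congr 1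
      omega

theorem loopA_iff (keyword : String) (words : List String) (ps : List (Int × String)) :
    loopA keyword words ps = true ↔
      ∃ p ∈ ps, PySem.Str.isIn keyword p.2 = true ∧
        negationWords.any (fun n =>
          (PySem.List.slice words (some (max 0 (p.1 - 4))) (some (p.1 + 1))).contains n) = true := by
  induction ps with
  | nil => simp [loopA]
  | cons p rest ih =>
    obtain ⟨i, word⟩ := p
    simp only [loopA]
    constructor
    · intro h
      split_ifs at h with h1 h2
      · exact ⟨(i, word), by simp, h1, h2⟩
      · obtain ⟨q, hq, hw⟩ := ih.mp h; exact ⟨q, List.mem_cons_of_mem _ hq, hw⟩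
      · obtain ⟨q, hq, hw⟩ := ih.mp h; exact ⟨q, List.mem_cons_of_mem _ hq, hw⟩
    · rintro ⟨q, hq, hkw, hwin⟩
      rcases List.mem_cons.mp hq with rfl | hq
      · simp only at hkw hwin
        rw [if_pos hkw, if_pos hwin]
      · split_ifs with h1 h2
        · rfl
        · exact ih.mpr ⟨q, hq, hkw, hwin⟩
        · exact ih.mpr ⟨q, hq, hkw, hwin⟩

theorem A_iff (keyword : String) (words : List String) :
    loopA keyword words (PySem.List.enumerate words) = true ↔ NegSpec keyword words := by
  rw [loopA_iff]
  constructor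
  · rintro ⟨p, hp, hkw, hwin⟩
    rw [PySem.List.mem_enumerate_iff] at hp
    obtain ⟨k, hk, rfl⟩ := hp
    simp only [zero_add] at hkw hwin ⊢
    rw [List.any_eq_true] at hwin
    obtain ⟨n, hn, hcont⟩ := hwin
    rw [List.contains_iff_mem] at hcont
    have hmax : max 0 ((k : Int) - 4) = ((k - 4 : Nat) : Int) := by omega
    have hone : (k : Int) + 1 = ((k + 1 : Nat) : Int) := by omega
    rw [hmax, hone, PySem.List.slice_natCast] at hcont
    rw [mem_drop_take] at hcont
    obtain ⟨j, hj, haj, hjb, rfl⟩ := hcont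
    exact ⟨k, hk, hkw, j, by omega, hj, hn, by omega⟩
  · rintro ⟨k, hk, hkw, j, hjk, hj, hneg, hj4⟩
    refine ⟨((k : Int), words[k]), ?_, hkw, ?_⟩
    · rw [PySem.List.mem_enumerate_iff]; exact ⟨k, hk, by simp⟩
    · rw [List.any_eq_true]
      refine ⟨words[j], hneg, ?_⟩
      rw [List.contains_iff_mem]
      have hmax : max 0 ((k : Int) - 4) = ((k - 4 : Nat) : Int) := by omega
      have hone : (k : Int) + 1 = ((k + 1 : Nat) : Int) := by omega
      rw [hmax, hone, PySem.List.slice_natCast, mem_drop_take]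
      exact ⟨j, hj, by omega, by omega, rfl⟩

-- membership in negationWords as the four-way Bool test of B
theorem isNeg_iff (w : String) :
    (w == "no" || w == "not" || w == "never" || w == "without") = true ↔ w ∈ negationWords := by
  simp [negationWords, or_assoc]

theorem loopB_iff (keyword : String) (ws : List String) (i lastNeg : Int)
    (hL : lastNeg ≤ i - 1) :
    loopB keyword ws i lastNeg = true ↔
      ∃ k, ∃ (hk : k < ws.length), PySem.Str.isIn keyword ws[k] = true ∧
        (i + (k : Int) - 4 ≤ lastNeg ∨
          ∃ j, j ≤ k ∧ ∃ (hj : j < ws.length), ws[j] ∈ negationWords ∧ (k : Int) - 4 ≤ (j : Int)) := by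
  induction ws generalizing i lastNeg with
  | nil => simp [loopB]
  | cons w rest ih =>
    simp only [loopB]
    by_cases hn : (w == "no" || w == "not" || w == "never" || w == "without") = true
    · -- lastNeg updated to i
      simp only [hn, if_true]
      have hw : w ∈ negationWords := (isNeg_iff w).mp hn
      split_ifs with hcond
      · simp only [true_iff]
        rw [Bool.and_eq_true, decide_eq_true_eq] at hcond
        exact ⟨0, by simp, hcond.1, Or.inr ⟨0, le_refl _, by simp, by simpa using hw, by omega⟩⟩
      · rw [ih (i + 1) i (by omega)]
        constructor
        · rintro ⟨k, hk, hkw, hrest⟩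
          refine ⟨k + 1, by simpa using Nat.succ_lt_succ hk, by simpa using hkw, ?_⟩
          rcases hrest with hLc | ⟨j, hjk, hj, hneg, hj4⟩
          · -- i + 1 + k - 4 ≤ i, so k ≤ 3: use w at j = 0
            exact Or.inr ⟨0, by omega, by simp, by simpa using hw, by push_cast; omega⟩
          · exact Or.inr ⟨j + 1, by omega, by simpa using Nat.succ_lt_succ hj,
              by simpa using hneg, by push_cast; omega⟩
        · rintro ⟨k, hk, hkw, hrest⟩
          match k with
          | 0 =>
            exfalso; apply hcond
            rw [Bool.and_eq_true, decide_eq_true_eq]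
            exact ⟨by simpa using hkw, by omega⟩
          | k + 1 =>
            refine ⟨k, by simpa using Nat.lt_of_succ_lt_succ hk, by simpa using hkw, ?_⟩
            rcases hrest with hLc | ⟨j, hjk, hj, hneg, hj4⟩
            · -- lastNeg ≤ i - 1 and i + (k+1) - 4 ≤ lastNeg forces k ≤ 2 ≤ 3: j = 0 works
              exact Or.inl (by push_cast at hLc ⊢; omega)
            · match j with
              | 0 => exact Or.inl (by push_cast at hj4 ⊢; omega)
              | j + 1 =>
                exact Or.inr ⟨j, by omega, by simpa using Nat.lt_of_succ_lt_succ hj,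
                  by simpa using hneg, by push_cast at hj4 ⊢; omega⟩
    · -- lastNeg unchanged
      rw [Bool.not_eq_true] at hn
      have hw : w ∉ negationWords := fun h => by simp [(isNeg_iff w).mpr h] at hn
      simp only [hn, Bool.false_eq_true, if_false]
      split_ifs with hcond
      · simp only [true_iff]
        rw [Bool.and_eq_true, decide_eq_true_eq] at hcond
        exact ⟨0, by simp, hcond.1, Or.inl (by omega)⟩
      · rw [ih (i + 1) lastNeg (by omega)]
        constructor
        · rintro ⟨k, hk, hkw, hrest⟩
          refine ⟨k + 1, by simpa using Nat.succ_lt_succ hk, by simpa using hkw, ?_⟩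
          rcases hrest with hLc | ⟨j, hjk, hj, hneg, hj4⟩
          · exact Or.inl (by push_cast at hLc ⊢; omega)
          · exact Or.inr ⟨j + 1, by omega, by simpa using Nat.succ_lt_succ hj,
              by simpa using hneg, by push_cast at hj4 ⊢; omega⟩
        · rintro ⟨k, hk, hkw, hrest⟩
          match k with
          | 0 =>
            exfalso; apply hcond
            rw [Bool.and_eq_true, decide_eq_true_eq]
            rcases hrest with hLc | ⟨j, hjk, hj, hneg, hj4⟩
            · exact ⟨by simpa using hkw, by omega⟩
            · interval_cases j
              exact absurd (by simpa using hneg) hw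
          | k + 1 =>
            refine ⟨k, by simpa using Nat.lt_of_succ_lt_succ hk, by simpa using hkw, ?_⟩
            rcases hrest with hLc | ⟨j, hjk, hj, hneg, hj4⟩
            · exact Or.inl (by push_cast at hLc ⊢; omega)
            · match j with
              | 0 => exact absurd (by simpa using hneg) hw
              | j + 1 =>
                exact Or.inr ⟨j, by omega, by simpa using Nat.lt_of_succ_lt_succ hj,
                  by simpa using hneg, by push_cast at hj4 ⊢; omega⟩

theorem B_iff (keyword : String) (words : List String) :
    loopB keyword words 0 (-5) = true ↔ NegSpec keyword words := by
  rw [loopB_iff keyword words 0 (-5) (by omega)]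
  unfold NegSpec
  constructor
  · rintro ⟨k, hk, hkw, hLc | hrest⟩
    · exfalso; omega
    · exact ⟨k, hk, hkw, hrest⟩
  · rintro ⟨k, hk, hkw, hrest⟩
    exact ⟨k, hk, hkw, Or.inr hrest⟩

-- ===== VERDICT (by name: the statement is the Claim_ definition above) =====
theorem is_negated_spec : Claim_equal_is_negated := by
  intro text keyword _
  unfold Spec_is_negated is_negated is_negated_alt
  rcases hA : loopA keyword (PySem.Str.split₀ text) (PySem.List.enumerate (PySem.Str.split₀ text)) with _ | _
  · rcases hB : loopB keyword (PySem.Str.split₀ text) 0 (-5) with _ | _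
    · rfl
    · exact absurd ((A_iff _ _).mpr ((B_iff _ _).mp hB)) (by simp [hA])
  · exact ((B_iff _ _).mpr ((A_iff _ _).mp hA)).symm
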